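-- pv_equiv track=rewrite | github.com/Adam-Jimenez/binarysearch-editorials | Ascending Cards.py | solve
-- ===== SOURCE A (Python) =====
-- from collections import deque
--
-- def solve(cards):
--     cards.sort()
--     idx=[i for i in range(len(cards))]
--     order=[]
--     q=deque(idx)
--     while q:
--         order.append(q.popleft())
--         if q: q.append(q.popleft())
--     ans=[0 for _ in cards]
--     for i,card in zip(order,cards):
--         ans[i]=card
--     return ans
-- ===== SOURCE B (Python) =====
-- from collections import deque
--
-- def solve(cards):
--     cards.sort()
--     ans = deque()
--     for card in reversed(cards):
--         if ans:
--             ans.appendleft(ans.pop())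
--         ans.appendleft(card)
--     return list(ans)
-- ===== Notes on version B (the rewrite author's own statement) =====
-- stated objective: simpler
-- what changed: Instead of simulating the forward deal on a deque of indices to build a position permutation and then scattering the sorted cards into a preallocated answer array, B runs the deal in reverse: one pass over the sorted cards from largest to smallest, rotating the partial deck (bottom card to top) and placing each card on top, building the answer directly — no index list, no permutation, no scatter pass (the constant-factor win a timing run measured).
import Mathlib
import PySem

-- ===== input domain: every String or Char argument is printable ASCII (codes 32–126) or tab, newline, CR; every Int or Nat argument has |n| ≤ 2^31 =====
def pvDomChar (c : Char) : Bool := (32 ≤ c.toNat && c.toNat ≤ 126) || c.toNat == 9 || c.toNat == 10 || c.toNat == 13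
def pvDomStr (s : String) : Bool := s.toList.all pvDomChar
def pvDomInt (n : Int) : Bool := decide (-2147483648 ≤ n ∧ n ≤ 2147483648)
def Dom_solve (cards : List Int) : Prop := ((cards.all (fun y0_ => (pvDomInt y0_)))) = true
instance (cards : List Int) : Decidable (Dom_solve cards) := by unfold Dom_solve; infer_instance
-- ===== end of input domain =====

-- B replaces A's forward deal simulation (index deque -> permutation -> scatter) by a single
-- reverse-deal pass that builds the answer directly; equivalence is about the RETURN value
-- (both Pythons also sort `cards` in place, the same mutation).

-- ===== PORT A =====
-- `if q: q.append(q.popleft())` — one rotation step of the remaining deque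
def rotFront {α : Type} (l : List α) : List α :=
  match l with
  | [] => []
  | b :: r => r ++ [b]

theorem rotFront_length {α : Type} (l : List α) : (rotFront l).length = l.length := by
  cases l <;> simp [rotFront]

-- the while-loop over the deque `q`: pop the front to `order`, rotate the rest
def dealOrder {α : Type} (q : List α) : List α :=
  match q with
  | [] => []
  | a :: rest => a :: dealOrder (rotFront rest)
termination_by q.length
decreasing_by simp [rotFront_length]

def solve (cards : List Int) : List Int :=
  let s := PySem.List.sorted cards (fun x => x) false
  let idx := PySem.List.pyRange 0 (s.length : Int) 1
  let order := dealOrder idx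
  let ans := List.replicate s.length (0 : Int)
  -- `ans[i] = card` for i from `order` (always a valid nonnegative index): pySetD is exact here
  (order.zip s).foldl (fun a p => PySem.List.pySetD a p.1 p.2) ans

-- ===== PORT B =====
-- `if ans: ans.appendleft(ans.pop())` — move the bottom card of the partial deck to the top
def rotStep (ans : List Int) : List Int :=
  match ans.getLast? with
  | none => ans
  | some x => x :: ans.dropLast

def solve_alt (cards : List Int) : List Int :=
  let s := PySem.List.sorted cards (fun x => x) false
  s.reverse.foldl (fun ans card => card :: rotStep ans) []

-- ===== PRECONDITION & SPEC =====
def Spec_solve (cards : List Int) (out : List Int) : Prop := out = solve_alt cards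
instance (cards : List Int) (out : List Int) : Decidable (Spec_solve cards out) := by unfold Spec_solve; infer_instance

-- ===== CLAIM (what is proved, stated in full; the proofs are below) =====
def Claim_equal_solve : Prop := ∀ (cards : List Int), Dom_solve cards → Spec_solve cards (solve cards)

-- ===== LEMMAS AND PROOFS =====

-- B's result, written as structural recursion on the (sorted) list
def gDeal : List Int → List Int
  | [] => []
  | c :: rest => c :: rotStep (gDeal rest)

-- A's scatter loop, with Nat indices
def scatterN (a : List Int) (ps : List (Nat × Int)) : List Int :=
  ps.foldl (fun a p => a.set p.1 p.2) a

theorem foldl_rev_eq_gDeal (s : List Int) :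
    s.reverse.foldl (fun ans card => card :: rotStep ans) [] = gDeal s := by
  induction s with
  | nil => rfl
  | cons c rest ih => simp [List.foldl_append, gDeal, ih]

theorem rotFront_map {α β : Type} (f : α → β) (l : List α) :
    rotFront (l.map f) = (rotFront l).map f := by
  cases l <;> simp [rotFront]

theorem dealOrder_map {α β : Type} (f : α → β) (q : List α) :
    dealOrder (q.map f) = (dealOrder q).map f := by
  induction hq : q.length using Nat.strong_induction_on generalizing q with
  | _ n ih =>
    cases q with
    | nil => simp [dealOrder]
    | cons a rest =>
      rw [List.map_cons, dealOrder, dealOrder, rotFront_map,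
        ih (rotFront rest).length (by simp [rotFront_length, ← hq]) _ rfl]
      simp

theorem rotFront_perm {α : Type} (l : List α) : (rotFront l).Perm l := by
  cases l with
  | nil => rfl
  | cons b r => simp [rotFront]

theorem dealOrder_perm {α : Type} (q : List α) : (dealOrder q).Perm q := by
  induction hq : q.length using Nat.strong_induction_on generalizing q with
  | _ n ih =>
    cases q with
    | nil => simp [dealOrder]
    | cons a rest =>
      rw [dealOrder]
      exact List.Perm.cons a
        (((ih (rotFront rest).length (by simp [rotFront_length, ← hq]) _ rfl)).trans
          (rotFront_perm rest))

theorem dealOrder_length {α : Type} (q : List α) : (dealOrder q).length = q.length :=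
  (dealOrder_perm q).length_eq

theorem scatterN_length (ps : List (Nat × Int)) (a : List Int) :
    (scatterN a ps).length = a.length := by
  induction ps generalizing a with
  | nil => rfl
  | cons p t ih =>
    show (scatterN (a.set p.1 p.2) t).length = a.length
    rw [ih, List.length_set]

theorem scatterN_getElem?_not_mem (ps : List (Nat × Int)) (a : List Int) (j : Nat)
    (h : j ∉ ps.map Prod.fst) : (scatterN a ps)[j]? = a[j]? := by
  induction ps generalizing a with
  | nil => rfl
  | cons p t ih =>
    simp only [List.map_cons, List.mem_cons, not_or] at h
    show (scatterN (a.set p.1 p.2) t)[j]? = a[j]?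
    rw [ih _ h.2, List.getElem?_set_ne (fun hh => h.1 hh.symm)]

theorem scatterN_getElem?_mem (ps : List (Nat × Int)) (a : List Int) (j : Nat) (x : Int)
    (hnd : (ps.map Prod.fst).Nodup) (hmem : (j, x) ∈ ps) (hj : j < a.length) :
    (scatterN a ps)[j]? = some x := by
  induction ps generalizing a with
  | nil => simp at hmem
  | cons p t ih =>
    simp only [List.map_cons, List.nodup_cons] at hnd
    rcases List.mem_cons.mp hmem with h | h
    · cases h
      show (scatterN (a.set j x) t)[j]? = some x
      rw [scatterN_getElem?_not_mem _ _ _ hnd.1, List.getElem?_set_self (by simpa using hj)]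
    · show (scatterN (a.set p.1 p.2) t)[j]? = some x
      exact ih _ hnd.2 h (by simpa using hj)

theorem rotStep_length (l : List Int) : (rotStep l).length = l.length := by
  cases l with
  | nil => rfl
  | cons b r =>
    cases h : (b :: r).getLast? with
    | none => simp [List.getLast?_eq_none_iff] at h
    | some x => simp [rotStep, h]

theorem gDeal_length (s : List Int) : (gDeal s).length = s.length := by
  induction s with
  | nil => rfl
  | cons c rest ih => simp [gDeal, rotStep_length, ih]

theorem rotStep_getElem?_zero (l : List Int) (hl : l ≠ []) :
    (rotStep l)[0]? = l[l.length - 1]? := by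
  cases h : l.getLast? with
  | none => simp [List.getLast?_eq_none_iff] at h; exact absurd h hl
  | some x =>
    rw [rotStep, h]
    rw [List.getLast?_eq_getElem?] at h
    simpa using h.symm

theorem rotStep_getElem?_succ (l : List Int) (j : Nat) (hj : j + 1 < l.length) :
    (rotStep l)[j + 1]? = l[j]? := by
  cases hl : l.getLast? with
  | none => simp [List.getLast?_eq_none_iff] at hl; simp [hl] at hj
  | some x =>
    rw [rotStep, hl]
    simp only [List.getElem?_cons_succ, List.getElem?_dropLast]
    rw [if_pos (by omega)]

-- relabelling of deck positions after the first deal step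
def fRelabel (m j : Nat) : Nat := if j = m then 1 else j + 2

theorem rotFront_range_succ (m : Nat) :
    rotFront (List.map Nat.succ (List.range (m + 1))) = (List.range (m + 1)).map (fRelabel m) := by
  have h1 : List.map Nat.succ (List.range (m + 1)) = 1 :: (List.range m).map (fun j => j + 2) := by
    rw [List.range_succ_eq_map, List.map_cons, List.map_map]
    refine congrArg (1 :: ·) (List.map_congr_left fun j _ => ?_)
    simp [Function.comp, Nat.succ_eq_add_one]
  have h2 : (List.range (m + 1)).map (fRelabel m) = (List.range m).map (fun j => j + 2) ++ [1] := by
    rw [List.range_succ, List.map_append]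
    simp only [List.map_cons, List.map_nil]
    rw [List.map_congr_left (fun j hj => by
        unfold fRelabel
        exact if_neg (Nat.ne_of_lt (List.mem_range.mp hj))),
      show fRelabel m m = 1 from by unfold fRelabel; exact if_pos rfl]
  rw [h1, h2, rotFront]

-- the main structural fact: scattering the sorted cards along A's deal order
-- equals B's reverse-deal recursion
theorem scatter_deal_eq_gDeal (s : List Int) :
    scatterN (List.replicate s.length 0) ((dealOrder (List.range s.length)).zip s) = gDeal s := by
  induction s with
  | nil => simp [List.range_zero, dealOrder, scatterN, gDeal]
  | cons c rest ih =>
    cases rest with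
    | nil =>
      show scatterN (List.replicate 1 0) ((dealOrder (List.range 1)).zip [c]) = gDeal [c]
      rw [List.range_one, show dealOrder [(0 : Nat)] = [0] by rw [dealOrder, rotFront, dealOrder]]
      simp [scatterN, gDeal, rotStep]
    | cons r0 r' =>
      set m := r'.length with hm
      set rest := r0 :: r' with hrest
      have hrl : rest.length = m + 1 := by simp [hrest, hm]
      set G := gDeal rest with hGdef
      have hGlen : G.length = m + 1 := by rw [hGdef, gDeal_length, hrl]
      set ordn := dealOrder (List.range (m + 1)) with hord
      have hordlen : ordn.length = m + 1 := by rw [hord, dealOrder_length, List.length_range]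
      have hordperm : ordn.Perm (List.range (m + 1)) := dealOrder_perm _
      have hordnd : ordn.Nodup := hordperm.nodup_iff.mpr (List.nodup_range)
      have hmemord : ∀ j, j ∈ ordn ↔ j < m + 1 := by
        intro j; rw [hordperm.mem_iff, List.mem_range]
      have hG : G = scatterN (List.replicate (m + 1) 0) (ordn.zip rest) := by
        rw [hGdef, hord]; rw [← hrl] at *; exact ih.symm
      have hinj : ∀ x ∈ ordn, ∀ y ∈ ordn, fRelabel m x = fRelabel m y → x = y := by
        intro x _ y _ hxy
        unfold fRelabel at hxy
        split_ifs at hxy <;> omega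
      have hndf : (ordn.map (fRelabel m)).Nodup := hordnd.map_on hinj
      have hdeal : dealOrder (List.range (m + 1 + 1)) = 0 :: (ordn.map (fRelabel m)) := by
        rw [List.range_succ_eq_map, dealOrder, rotFront_range_succ, dealOrder_map, hord]
      have hlen2 : (c :: rest).length = m + 1 + 1 := by simp [hrl]
      rw [hlen2, hdeal]
      show scatterN ((List.replicate (m + 2) 0).set 0 c)
          ((ordn.map (fRelabel m)).zip rest) = c :: rotStep G
      have hfst : ((ordn.map (fRelabel m)).zip rest).map Prod.fst = ordn.map (fRelabel m) :=
        List.map_fst_zip (by rw [List.length_map, hordlen, hrl])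
      apply List.ext_getElem?
      intro i
      match i with
      | 0 =>
        rw [scatterN_getElem?_not_mem _ _ _ (by
          rw [hfst]
          intro hmem
          obtain ⟨x, -, hx⟩ := List.mem_map.mp hmem
          unfold fRelabel at hx
          split_ifs at hx)]
        rw [List.getElem?_set_self (by simp)]
        simp
      | j + 1 =>
        by_cases hj : j < m + 1
        · -- position j+1 receives the card scattered to deal index j'
          set j' : Nat := if j = 0 then m else j - 1 with hj'def
          have hj' : j' < m + 1 := by rw [hj'def]; split_ifs <;> omega
          have hfj' : fRelabel m j' = j + 1 := by
            unfold fRelabel; rw [hj'def]; split_ifs <;> omega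
          obtain ⟨k0, hk0, hk0v⟩ := List.mem_iff_getElem.mp ((hmemord j').mpr hj')
          have hk0r : k0 < rest.length := by rw [hordlen] at hk0; omega
          have hpair : (j', rest[k0]) ∈ ordn.zip rest := by
            rw [List.mem_iff_getElem]
            exact ⟨k0, by rw [List.length_zip]; omega, by rw [List.getElem_zip, hk0v]⟩
          have hlhs : (scatterN ((List.replicate (m + 2) 0).set 0 c)
              ((ordn.map (fRelabel m)).zip rest))[j + 1]? = some rest[k0] := by
            rw [List.zip_map_left]
            apply scatterN_getElem?_mem _ _ _ _ (by rw [← List.zip_map_left, hfst]; exact hndf)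
            · exact List.mem_map.mpr ⟨(j', rest[k0]), hpair, by simp [hfj']⟩
            · rw [List.length_set, List.length_replicate]; omega
          rw [hlhs]
          have hGne : G ≠ [] := by intro h; rw [h] at hGlen; simp at hGlen
          have hrot : (rotStep G)[j]? = G[j']? := by
            rw [hj'def]
            by_cases h0 : j = 0
            · rw [h0, rotStep_getElem?_zero G hGne, if_pos rfl, hGlen]
              simp
            · rw [if_neg h0]
              obtain ⟨k, rfl⟩ : ∃ k, j = k + 1 := ⟨j - 1, by omega⟩
              rw [rotStep_getElem?_succ G k (by omega)]
              simp
          have hG' : G[j']? = some rest[k0] := by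
            rw [hG]
            exact scatterN_getElem?_mem _ _ _ _
              (by rw [List.map_fst_zip (by omega)]; exact hordnd) hpair (by simp [hj'])
          rw [List.getElem?_cons_succ, hrot, hG']
        · -- beyond both lengths: none = none
          rw [List.getElem?_eq_none (by rw [scatterN_length, List.length_set]; simp; omega),
            List.getElem?_eq_none (by simp [rotStep_length, hGlen]; omega)]

theorem solve_eq_core (s : List Int) :
    (((dealOrder (PySem.List.pyRange 0 (s.length : Int) 1)).zip s).foldl
      (fun a p => PySem.List.pySetD a p.1 p.2) (List.replicate s.length (0 : Int)))
    = gDeal s := by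
  rw [PySem.List.pyRange_zero_natCast, dealOrder_map, List.zip_map_left, List.foldl_map]
  simp only [Prod.map, id, PySem.List.pySetD_natCast]
  exact scatter_deal_eq_gDeal s

-- ===== VERDICT (by name: the statement is the Claim_ definition above) =====
theorem solve_spec : Claim_equal_solve := by
  intro cards _
  show solve cards = solve_alt cards
  rw [solve, solve_alt, foldl_rev_eq_gDeal, solve_eq_core]
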